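-- pv_equiv track=rewrite | github.com/woranov/aoc2020 | day15/part1.py | compute
-- ===== SOURCE A (Python) =====
-- import collections
--
-- def compute(data):
--     """
--     >>> compute("0,3,6")
--     436
--     >>> compute("1,3,2")
--     1
--     >>> compute("2,1,3")
--     10
--     >>> compute("1,2,3")
--     27
--     >>> compute("2,3,1")
--     78
--     >>> compute("3,2,1")
--     438
--     >>> compute("3,1,2")
--     1836
--     """
--     spoken = collections.defaultdict(lambda: collections.deque(maxlen=2))
--
--     starting = map(int, data.split(","))
--     last_number = None
--     i = 0
--
--     for i, last_number in enumerate(starting, start=i + 1):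
--         spoken[last_number].append(i)
--
--     for i in range(i + 1, 2021):
--         if len(spoken[last_number]) <= 1:
--             last_number = 0
--         else:
--             last_number = spoken[last_number][1] - spoken[last_number][0]
--
--         spoken[last_number].append(i)
--
--     return last_number
-- ===== SOURCE B (Python) =====
-- def compute(data):
--     history = [int(s) for s in data.split(",")]
--     while len(history) < 2020:
--         last = history[-1]
--         prev = None
--         for turn, number in enumerate(history[:-1], start=1):
--             if number == last:
--                 prev = turn
--         history.append(0 if prev is None else len(history) - prev)
--     return history[-1]
-- ===== Notes on version B (the rewrite author's own statement) =====
-- stated objective: alternative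
-- what changed: B keeps no per-number memory at all: it stores the full spoken sequence in a list and, each turn, rescans the whole history for the previous occurrence of the last number, trading A's per-number two-slot deque map for a memoryless history-scan algorithm.
import Mathlib
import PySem

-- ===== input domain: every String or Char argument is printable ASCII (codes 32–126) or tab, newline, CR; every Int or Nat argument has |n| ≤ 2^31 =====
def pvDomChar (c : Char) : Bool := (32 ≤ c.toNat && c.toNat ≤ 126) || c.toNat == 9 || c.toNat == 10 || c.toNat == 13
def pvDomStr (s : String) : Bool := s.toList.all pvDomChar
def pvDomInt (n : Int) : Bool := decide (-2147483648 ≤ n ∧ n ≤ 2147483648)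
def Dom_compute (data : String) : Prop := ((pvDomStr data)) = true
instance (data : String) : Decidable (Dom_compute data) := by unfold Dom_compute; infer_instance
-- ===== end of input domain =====

-- B keeps no per-number memory: it stores the whole spoken sequence in a list and rescans
-- it each turn for the previous occurrence of the last number (alternative algorithm).

-- ===== PORT A =====
-- append to a deque with maxlen=2: drop the left element when full
def pvDeqApp (ds : List Int) (i : Int) : List Int :=
  if ds.length < 2 then ds ++ [i] else ds.tail ++ [i]

-- body of A's seeding loop 'for i, last_number in enumerate(starting, start=i+1)'
def pvSeedA (st : PySem.Dict Int (List Int) × Int × Int) (x : Int) :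
    PySem.Dict Int (List Int) × Int × Int :=
  (st.1.insert x (pvDeqApp (st.1.getD x []) (st.2.2 + 1)), x, st.2.2 + 1)

-- body of A's game loop 'for i in range(i+1, 2021)'; the defaultdict read is getD _ []
-- (an entry auto-created empty is indistinguishable from an absent one under getD)
def pvBodyA (st : PySem.Dict Int (List Int) × Int) (t : Int) :
    PySem.Dict Int (List Int) × Int :=
  let ds := st.1.getD st.2 []
  let last : Int :=
    if (ds.length : Int) ≤ 1 then 0
    else (PySem.List.pyGet? ds 1).getD 0 - (PySem.List.pyGet? ds 0).getD 0
  (st.1.insert last (pvDeqApp (st.1.getD last []) t), last)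

-- int(s) on a token: ofChars?; the .getD 0 default is only reached outside Pre_ (ValueError)
def compute (data : String) : Int :=
  let starting := (PySem.Chars.splitOn data.toList [',']).map
    (fun s => (PySem.Int.ofChars? s).getD 0)
  let s1 := starting.foldl pvSeedA (PySem.Dict.empty, 0, 0)
  let s2 := (PySem.List.pyRange (s1.2.2 + 1) 2021 1).foldl pvBodyA (s1.1, s1.2.1)
  s2.2

-- ===== PORT B =====
-- B's inner scan 'for turn, number in enumerate(history[:-1], start=1): if number == last: prev = turn'
def pvPrevB (hist : List Int) (last : Int) : Option Int :=
  (PySem.List.enumerate hist.dropLast 1).foldl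
    (fun acc p => if p.2 = last then some p.1 else acc) none

-- one iteration of B's while-loop body: history[-1], the scan, one append
def pvStepB (hist : List Int) : List Int :=
  let last := (PySem.List.pyGet? hist (-1)).getD 0
  hist ++ [match pvPrevB hist last with
           | none => 0
           | some p => (hist.length : Int) - p]

-- 'while len(history) < 2020': fueled; each iteration appends one element, so 2020 units
-- of fuel always reach the exit condition
def pvLoopB : Nat → List Int → List Int
  | 0, h => h
  | Nat.succ k, h => if h.length < 2020 then pvLoopB k (pvStepB h) else h

def compute_alt (data : String) : Int :=
  let history := (PySem.Chars.splitOn data.toList [',']).map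
    (fun s => (PySem.Int.ofChars? s).getD 0)
  (PySem.List.pyGet? (pvLoopB 2020 history) (-1)).getD 0

-- ===== PRECONDITION & SPEC =====
-- Pre_ excludes exactly the inputs where int() raises ValueError on some comma-separated token
-- (e.g. "" or "1,x"); both A and B raise there.
def Pre_compute (data : String) : Prop :=
  ∀ s ∈ PySem.Chars.splitOn data.toList [','], (PySem.Int.ofChars? s).isSome

instance (data : String) : Decidable (Pre_compute data) := by unfold Pre_compute; infer_instance

def pvWitness_compute : String := "0,3,6"

def Spec_compute (data : String) (out : Int) : Prop := out = compute_alt data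
instance (data : String) (out : Int) : Decidable (Spec_compute data out) := by
  unfold Spec_compute; infer_instance

-- ===== CLAIM (what is proved, stated in full; the proofs are below) =====
def Claim_equal_compute : Prop :=
  ∀ (data : String), Dom_compute data → Pre_compute data → Spec_compute data (compute data)

-- ===== LEMMAS AND PROOFS =====

-- 1-based positions at which n occurs in h
def pvOcc (n : Int) (h : List Int) : List Int :=
  (PySem.List.enumerate h 1).filterMap (fun p => if p.2 = n then some p.1 else none)

-- the last at most two elements of a list
def pvTake2 (l : List Int) : List Int := (l.reverse.take 2).reverse

-- Invariant before the iteration of turn t: B's history h is the full spoken sequence,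
-- its last element is A's last number, and A's deque for each n holds the last ≤2
-- positions at which n occurs in h.
def pvInv (t : Int) (sp : PySem.Dict Int (List Int)) (last : Int) (h : List Int) : Prop :=
  h ≠ [] ∧ ((h.length : Int) = t - 1) ∧ h.getLast? = some last ∧
  ∀ n : Int, sp.getD n [] = pvTake2 (pvOcc n h)

theorem pvOcc_append (n : Int) (h : List Int) (x : Int) :
    pvOcc n (h ++ [x]) = pvOcc n h ++ (if x = n then [1 + (h.length : Int)] else []) := by
  unfold pvOcc
  rw [PySem.List.enumerate_append, List.filterMap_append]
  congr 1
  simp only [PySem.List.enumerate_cons, PySem.List.enumerate_nil]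
  split <;> simp_all

theorem pvTake2_append (l : List Int) (a : Int) :
    pvTake2 (l ++ [a]) = pvDeqApp (pvTake2 l) a := by
  unfold pvTake2 pvDeqApp
  rcases hl : l.reverse with _ | ⟨x, _ | ⟨y, r⟩⟩ <;> simp [hl]

theorem pvTake2_concat_of_ne_nil (os : List Int) (L : Int) (h : os ≠ []) :
    pvTake2 (os ++ [L]) = [os.getLast h, L] := by
  unfold pvTake2
  rcases hr : os.reverse with _ | ⟨q, r⟩
  · simp at hr; exact absurd hr h
  · have hq : os.getLast h = q := by
      have h1 : os.getLast? = some q := by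
        rw [← List.head?_reverse, hr]; rfl
      rw [List.getLast?_eq_some_getLast h] at h1
      exact Option.some_inj.mp h1
    simp [hr, hq]

-- speaking y as the (h.length+1)-st number preserves the deque/occurrence relation
theorem pvSp_step (sp : PySem.Dict Int (List Int)) (h : List Int) (y : Int)
    (hinv : ∀ n : Int, sp.getD n [] = pvTake2 (pvOcc n h)) (n : Int) :
    (sp.insert y (pvDeqApp (sp.getD y []) ((h.length : Int) + 1))).getD n []
      = pvTake2 (pvOcc n (h ++ [y])) := by
  rw [PySem.Dict.getD_insert, pvOcc_append]
  by_cases hn : n = y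
  · subst hn
    rw [if_pos rfl, if_pos rfl, hinv n,
        show (1 + (h.length : Int)) = (h.length : Int) + 1 by omega]
    exact (pvTake2_append _ _).symm
  · rw [if_neg hn, if_neg (fun hyn => hn hyn.symm)]
    simp [hinv n]

-- a fold keeping the latest match returns the last element of the filtered list
theorem pvFold_last (n : Int) : ∀ (l : List (Int × Int)) (init : Option Int),
    l.foldl (fun acc p => if p.2 = n then some p.1 else acc) init
      = match (l.filterMap (fun p => if p.2 = n then some p.1 else none)).getLast? with
        | some v => some v
        | none => init := by
  intro l
  induction l using List.reverseRecOn with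
  | nil => intro init; simp
  | append_singleton l p ih =>
    intro init
    rw [List.foldl_append, List.filterMap_append]
    simp only [List.foldl_cons, List.foldl_nil]
    by_cases hp : p.2 = n
    · simp [hp]
    · simp only [hp, if_false, ih init]
      simp [hp]

theorem pvPrevB_eq (hist : List Int) (last : Int) :
    pvPrevB hist last = (pvOcc last hist.dropLast).getLast? := by
  unfold pvPrevB pvOcc
  rw [pvFold_last]
  rcases hx : ((PySem.List.enumerate hist.dropLast 1).filterMap
      (fun p => if p.2 = last then some p.1 else none)).getLast? with _ | v <;> simp [hx]

theorem pvStepB_eq (hist : List Int) :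
    pvStepB hist = hist ++ [match pvPrevB hist ((PySem.List.pyGet? hist (-1)).getD 0) with
                            | none => 0
                            | some p => (hist.length : Int) - p] := rfl

-- under the invariant both loop bodies speak the same next number
theorem pvNext_eq (t : Int) (sp : PySem.Dict Int (List Int)) (last : Int) (h : List Int)
    (hinv : pvInv t sp last h) :
    (pvBodyA (sp, last) t).2
      = (match pvPrevB h ((PySem.List.pyGet? h (-1)).getD 0) with
         | none => 0
         | some p => (h.length : Int) - p) := by
  obtain ⟨hne, hlen, hlast, hocc⟩ := hinv
  have hget : (PySem.List.pyGet? h (-1)).getD 0 = last := by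
    rw [PySem.List.pyGet?_neg_one, hlast]; rfl
  have hgl : h.getLast hne = last := by
    have h1 := List.getLast?_eq_some_getLast hne
    rw [h1] at hlast; exact Option.some_inj.mp hlast
  have hdecomp : h.dropLast ++ [last] = h := by
    rw [← hgl]; exact List.dropLast_concat_getLast hne
  have hL : 1 + (h.dropLast.length : Int) = (h.length : Int) := by
    have h0 : h.length ≠ 0 := fun hc => hne (List.eq_nil_of_length_eq_zero hc)
    simp only [List.length_dropLast]
    omega
  have hoccl : pvOcc last h = pvOcc last h.dropLast ++ [(h.length : Int)] := by
    conv_lhs => rw [← hdecomp]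
    rw [pvOcc_append, if_pos rfl, hL]
  have hds : sp.getD last [] = pvTake2 (pvOcc last h) := hocc last
  rw [hget, pvPrevB_eq]
  by_cases hos : pvOcc last h.dropLast = []
  · rw [hos] at hoccl
    simp only [pvBodyA, hds, hoccl, hos]
    simp [pvTake2]
  · have hql := List.getLast?_eq_some_getLast hos
    have hds2 : sp.getD last [] = [(pvOcc last h.dropLast).getLast hos, (h.length : Int)] := by
      rw [hds, hoccl, pvTake2_concat_of_ne_nil _ _ hos]
    simp only [pvBodyA, hds2, hql]
    simp [PySem.List.pyGet?, PySem.List.pyIdx?]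

-- exhausted exit condition: once the history is long enough the loop returns it unchanged
theorem pvLoopB_of_ge (fuel : Nat) (h : List Int) (hge : 2020 ≤ h.length) :
    pvLoopB fuel h = h := by
  cases fuel with
  | zero => rfl
  | succ k => unfold pvLoopB; rw [if_neg (by omega)]

-- the two game loops agree, given the invariant and enough fuel
theorem pvLoop_eq : ∀ (m fuel : Nat) (t : Int) (sp : PySem.Dict Int (List Int))
    (last : Int) (h : List Int), (2021 - t).toNat = m → m ≤ fuel →
    pvInv t sp last h →
    ((PySem.List.pyRange t 2021 1).foldl pvBodyA (sp, last)).2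
      = (PySem.List.pyGet? (pvLoopB fuel h) (-1)).getD 0 := by
  intro m
  induction m with
  | zero =>
    intro fuel t sp last h hm _ hinv
    obtain ⟨hne, hlen, hlast, _⟩ := hinv
    rw [PySem.List.pyRange_one_eq_nil (by omega), pvLoopB_of_ge fuel h (by omega)]
    rw [PySem.List.pyGet?_neg_one, hlast]
    rfl
  | succ k ih =>
    intro fuel t sp last h hm hfuel hinv
    obtain ⟨f, rfl⟩ : ∃ f, fuel = f + 1 := ⟨fuel - 1, by omega⟩
    have ht : t < 2021 := by omega
    have hlt : h.length < 2020 := by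
      obtain ⟨_, hlen, _, _⟩ := hinv; omega
    rw [PySem.List.pyRange_one_cons ht, List.foldl_cons]
    show ((PySem.List.pyRange (t + 1) 2021 1).foldl pvBodyA (pvBodyA (sp, last) t)).2 = _
    unfold pvLoopB
    rw [if_pos hlt]
    obtain ⟨hne, hlen, hlast, hocc⟩ := hinv
    have hnext := pvNext_eq t sp last h ⟨hne, hlen, hlast, hocc⟩
    have hstep : pvStepB h = h ++ [(pvBodyA (sp, last) t).2] := by
      rw [pvStepB_eq, ← hnext]
    have hbody : pvBodyA (sp, last) t
        = (sp.insert ((pvBodyA (sp, last) t).2)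
            (pvDeqApp (sp.getD ((pvBodyA (sp, last) t).2) []) t), (pvBodyA (sp, last) t).2) :=
      rfl
    rw [hstep]
    set y := (pvBodyA (sp, last) t).2 with hy
    rw [hbody]
    refine ih f (t + 1) _ y (h ++ [y]) (by omega) (by omega) ?_
    refine ⟨by simp, by simp; omega, by simp, ?_⟩
    intro n
    have := pvSp_step sp h y hocc n
    rwa [show ((h.length : Int) + 1) = t by omega] at this

-- A's seed fold: the counter is the number of starters spoken
theorem pvSeed_len : ∀ (xs : List Int) (st : PySem.Dict Int (List Int) × Int × Int),
    (xs.foldl pvSeedA st).2.2 = st.2.2 + xs.length := by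
  intro xs
  induction xs with
  | nil => simp
  | cons x xs ih => intro st; simp [ih, pvSeedA]; omega

-- A's seed fold builds exactly the last-two-occurrences deques of the starter list
theorem pvSeed_occ : ∀ (h : List Int) (n : Int),
    ((h.foldl pvSeedA (PySem.Dict.empty, 0, 0)).1).getD n [] = pvTake2 (pvOcc n h) := by
  intro h
  induction h using List.reverseRecOn with
  | nil =>
    intro n
    simp [pvOcc, pvTake2, PySem.List.enumerate_nil, PySem.Dict.getD_empty]
  | append_singleton ys w ih =>
    intro n
    rw [List.foldl_append]
    simp only [List.foldl_cons, List.foldl_nil, pvSeedA]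
    have hcnt : (ys.foldl pvSeedA (PySem.Dict.empty, 0, 0)).2.2 = (ys.length : Int) := by
      rw [pvSeed_len]; simp
    rw [hcnt]
    exact pvSp_step _ ys w ih n

-- Python's split always returns at least one piece
theorem pvSplitOn_go_ne_nil (sep : List Char) : ∀ (fuel : Nat) (l cur : List Char)
    (acc : List (List Char)), PySem.Chars.splitOn.go sep fuel l cur acc ≠ [] := by
  intro fuel
  induction fuel with
  | zero => intro l cur acc; unfold PySem.Chars.splitOn.go; simp
  | succ k ih =>
    intro l cur acc
    unfold PySem.Chars.splitOn.go
    rcases l with _ | ⟨c, rest⟩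
    · simp
    · dsimp only
      split
      · exact ih _ _ _
      · exact ih _ _ _

theorem pvSplitOn_ne_nil (s sep : List Char) : PySem.Chars.splitOn s sep ≠ [] := by
  unfold PySem.Chars.splitOn
  exact pvSplitOn_go_ne_nil sep _ s [] []

-- ===== VERDICT (by name: the statement is the Claim_ definition above) =====
set_option maxRecDepth 8000 in
theorem compute_spec : Claim_equal_compute := by
  intro data _ _
  unfold Spec_compute compute compute_alt
  set starting := (PySem.Chars.splitOn data.toList [',']).map
    (fun s => (PySem.Int.ofChars? s).getD 0) with hst
  have hne : starting ≠ [] := by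
    simp only [hst, ne_eq, List.map_eq_nil_iff]
    exact pvSplitOn_ne_nil _ _
  obtain ⟨xs, x, hxs⟩ := List.eq_nil_or_concat starting |>.resolve_left hne
  rw [List.concat_eq_append] at hxs
  have hlen : (starting.foldl pvSeedA (PySem.Dict.empty, 0, 0)).2.2
      = (starting.length : Int) := by
    rw [pvSeed_len]; simp
  have hlast : (starting.foldl pvSeedA (PySem.Dict.empty, 0, 0)).2.1 = x := by
    rw [hxs, List.foldl_append]; simp [pvSeedA]
  have hgl : starting.getLast? = some x := by rw [hxs]; simp
  simp only [hlen, hlast]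
  exact pvLoop_eq (2021 - ((starting.length : Int) + 1)).toNat 2020
    ((starting.length : Int) + 1) _ x starting (rfl) (by omega)
    ⟨hne, by omega, hgl, pvSeed_occ starting⟩
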